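-- pv_equiv track=rewrite | github.com/824zzy/Leetcode | 1_Array/Hash_Table/560_Subarray_Sum_Equals_K_L1.py | subarraySum
-- ===== SOURCE A (Python) =====
-- from typing import List
--
-- def subarraySum(nums: List[int], k: int) -> int:
--     # TODO: big hash trick
--     hash = {}
--     sum = 0
--     count = 0
--     for n in nums:
--         sum += n
--         if sum == k:
--             count += 1
--         if sum - k in hash:
--             count += hash[sum - k]
--         if sum in hash:
--             hash[sum] = hash[sum] + 1
--         else:
--             hash[sum] = 1
--     return count
-- ===== SOURCE B (Python) =====
-- from typing import List
--
-- def subarraySum(nums: List[int], k: int) -> int: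
--     # Direct nested scan: for each suffix, count prefixes of it summing to k.
--     count = 0
--     suffix = nums
--     while suffix:
--         s = 0
--         for x in suffix:
--             s += x
--             if s == k:
--                 count += 1
--         suffix = suffix[1:]
--     return count
-- ===== Notes on version B (the rewrite author's own statement) =====
-- stated objective: alternative
-- what changed: Replaces the prefix-sum frequency dictionary with a direct nested scan that, for each suffix, counts its prefixes summing to k.
import Mathlib
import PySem

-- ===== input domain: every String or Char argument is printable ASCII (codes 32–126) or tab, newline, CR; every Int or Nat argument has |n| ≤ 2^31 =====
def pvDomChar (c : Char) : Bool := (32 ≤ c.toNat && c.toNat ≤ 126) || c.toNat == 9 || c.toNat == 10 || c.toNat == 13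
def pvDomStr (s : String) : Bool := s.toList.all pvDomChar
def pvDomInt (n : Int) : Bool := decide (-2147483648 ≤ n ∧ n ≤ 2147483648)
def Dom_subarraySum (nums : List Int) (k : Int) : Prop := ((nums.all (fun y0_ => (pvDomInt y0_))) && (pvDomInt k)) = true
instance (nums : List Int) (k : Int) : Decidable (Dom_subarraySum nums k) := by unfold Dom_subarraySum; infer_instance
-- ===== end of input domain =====

-- B replaces A's prefix-sum frequency dictionary with a direct nested scan over suffixes (alternative algorithm, not faster).


-- ===== PORT A =====
-- one loop step of A: state is (hash, sum, count)
def stepA (k : Int) (st : PySem.Dict Int Int × Int × Int) (n : Int) : PySem.Dict Int Int × Int × Int :=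
  let h := st.1
  let s := st.2.1 + n
  let c := st.2.2
  let c := if s = k then c + 1 else c
  let c := if (h.get? (s - k)).isSome then c + h.getD (s - k) 0 else c
  let h := match h.get? s with
    | some v => h.insert s (v + 1)
    | none => h.insert s 1
  (h, s, c)

def subarraySum (nums : List Int) (k : Int) : Int :=
  (nums.foldl (stepA k) (PySem.Dict.empty, 0, 0)).2.2

-- ===== PORT B =====
-- inner 'for x in suffix' loop: state is (count, s)
def innerB (k : Int) (suffix : List Int) (st : Int × Int) : Int × Int :=
  suffix.foldl (fun (p : Int × Int) x =>
    let s := p.2 + x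
    if s = k then (p.1 + 1, s) else (p.1, s)) st

-- the 'while suffix' loop, peeling suffix = suffix[1:] each round
def altGo (k : Int) : List Int → Int → Int
  | [], count => count
  | x :: rest, count => altGo k rest (innerB k (x :: rest) (count, 0)).1

def subarraySum_alt (nums : List Int) (k : Int) : Int :=
  altGo k nums 0

-- ===== PRECONDITION & SPEC =====
def Spec_subarraySum (nums : List Int) (k : Int) (out : Int) : Prop := out = subarraySum_alt nums k
instance (nums : List Int) (k : Int) (out : Int) : Decidable (Spec_subarraySum nums k out) := by unfold Spec_subarraySum; infer_instance

-- ===== CLAIM (what is proved, stated in full; the proofs are below) =====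
def Claim_equal_subarraySum : Prop := ∀ (nums : List Int) (k : Int), Dom_subarraySum nums k → Spec_subarraySum nums k (subarraySum nums k)

-- ===== LEMMAS AND PROOFS =====

-- number of nonempty prefixes of xs whose sum is t
def prefCount : List Int → Int → Int
  | [], _ => 0
  | x :: xs, t => (if x = t then 1 else 0) + prefCount xs (t - x)

-- common spec: sum over suffixes of prefCount · k
def specB (k : Int) : List Int → Int
  | [] => 0
  | x :: rest => prefCount (x :: rest) k + specB k rest

lemma innerB_eq (k : Int) (xs : List Int) : ∀ (c s0 : Int),
    innerB k xs (c, s0) = (c + prefCount xs (k - s0), s0 + xs.sum) := by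
  induction xs with
  | nil => intro c s0; simp [innerB, prefCount]
  | cons x xs ih =>
    intro c s0
    simp only [innerB, List.foldl_cons] at *
    rw [show k - s0 = (s0 + x - s0) + (k - s0 - x) from by ring]
    simp only [prefCount]
    rw [show (s0 + x - s0) + (k - s0 - x) = k - s0 from by ring]
    by_cases hx : s0 + x = k
    · rw [if_pos hx, ih, if_pos (by omega : x = k - s0),
        show k - (s0 + x) = k - s0 - x from by ring]
      simp only [Prod.mk.injEq, List.sum_cons]
      constructor <;> ring
    · rw [if_neg hx, ih, if_neg (by omega : ¬ x = k - s0),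
        show k - (s0 + x) = k - s0 - x from by ring]
      simp only [Prod.mk.injEq, List.sum_cons]
      constructor <;> ring

lemma altGo_eq (k : Int) (l : List Int) : ∀ c : Int, altGo k l c = c + specB k l := by
  induction l with
  | nil => intro c; simp [altGo, specB]
  | cons x rest ih =>
    intro c
    simp only [altGo, innerB_eq, specB]
    rw [ih, show k - (0 : Int) = k from by ring]
    ring

lemma prefCount_append (x : Int) (zs : List Int) : ∀ t : Int,
    prefCount (zs ++ [x]) t = prefCount zs t + (if zs.sum + x = t then 1 else 0) := by
  induction zs with
  | nil =>
    intro t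
    simp only [List.nil_append, prefCount, List.sum_nil]
    split_ifs <;> omega
  | cons z zs ih =>
    intro t
    simp only [List.cons_append, prefCount, List.sum_cons, ih]
    split_ifs <;> omega

lemma specB_append (k x : Int) (pre : List Int) :
    specB k (pre ++ [x]) =
      specB k pre + ((if pre.sum + x = k then 1 else 0) + prefCount pre (pre.sum + x - k)) := by
  induction pre with
  | nil =>
    simp only [List.nil_append, specB, prefCount, List.sum_nil]
    split_ifs <;> omega
  | cons y ys ih =>
    simp only [List.cons_append, specB, ih, prefCount_append, List.sum_cons, prefCount]
    rw [show y + ys.sum + x - k - y = ys.sum + x - k from by ring]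
    split_ifs <;> omega

lemma loopA_eq (k : Int) : ∀ (nums pre : List Int) (h : PySem.Dict Int Int) (c : Int),
    (∀ t, h.getD t 0 = prefCount pre t) → c = specB k pre →
    (nums.foldl (stepA k) (h, pre.sum, c)).2.2 = specB k (pre ++ nums) := by
  intro nums
  induction nums with
  | nil => intro pre h c _ hc; simp [hc]
  | cons x xs ih =>
    intro pre h c hinv hc
    rw [List.foldl_cons]
    have hsum : (pre ++ [x]).sum = pre.sum + x := by simp
    -- the count after this step
    have hc2 : (stepA k (h, pre.sum, c) x).2.2 = specB k (pre ++ [x]) := by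
      simp only [stepA, specB_append, hc]
      rcases hg : h.get? (pre.sum + x - k) with _ | v
      · have h0 : prefCount pre (pre.sum + x - k) = 0 := by
          rw [← hinv]; exact PySem.Dict.getD_of_get?_eq_none h 0 hg
        simp only [Option.isSome_none, Bool.false_eq_true, if_false, h0]
        split_ifs <;> ring
      · simp only [Option.isSome_some, if_true, hinv]
        split_ifs <;> ring
    -- the dict after this step
    have hinv2 : ∀ t, (stepA k (h, pre.sum, c) x).1.getD t 0 = prefCount (pre ++ [x]) t := by
      intro t
      have hform : (stepA k (h, pre.sum, c) x).1.getD t 0 =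
          if t = pre.sum + x then h.getD (pre.sum + x) 0 + 1 else h.getD t 0 := by
        simp only [stepA]
        rcases hg : h.get? (pre.sum + x) with _ | v
        · have h0 : h.getD (pre.sum + x) 0 = 0 := PySem.Dict.getD_of_get?_eq_none h 0 hg
          simp [PySem.Dict.getD_insert, h0]
        · have hv : h.getD (pre.sum + x) 0 = v := PySem.Dict.getD_of_get?_eq_some h 0 hg
          simp [PySem.Dict.getD_insert, hv]
      rw [hform, prefCount_append]
      by_cases ht : t = pre.sum + x
      · rw [if_pos ht, if_pos (by omega), hinv, ht]
      · rw [if_neg ht, if_neg (by omega), hinv]; ring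
    have hst : (stepA k (h, pre.sum, c) x).2.1 = pre.sum + x := by simp [stepA]
    have hmain := ih (pre ++ [x]) (stepA k (h, pre.sum, c) x).1 (stepA k (h, pre.sum, c) x).2.2
      hinv2 hc2
    rw [hsum] at hmain
    have hrepack : (stepA k (h, pre.sum, c) x) =
        ((stepA k (h, pre.sum, c) x).1, pre.sum + x, (stepA k (h, pre.sum, c) x).2.2) := by
      rw [← hst]
    rw [hrepack, hmain, List.append_assoc]
    rfl

-- ===== VERDICT (by name: the statement is the Claim_ definition above) =====
theorem subarraySum_spec : Claim_equal_subarraySum := by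
  intro nums k _
  unfold Spec_subarraySum subarraySum subarraySum_alt
  have hA := loopA_eq k nums [] PySem.Dict.empty 0
    (by intro t; simp [prefCount]) (by simp [specB])
  simp only [List.sum_nil, List.nil_append] at hA
  rw [hA, altGo_eq]
  ring
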